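-- pv_equiv track=rewrite | github.com/fsgeek/Mallku | examples/consciousness_circulation_integration.py | _determine_anchor_type
-- ===== SOURCE A (Python) =====
-- def _determine_anchor_type(anchor_data: dict) -> str:
--     """Determine the type of memory anchor for consciousness categorization."""
--     if any(key in anchor_data for key in ["consciousness_score", "awareness_level"]):
--         return "consciousness_anchor"
--     elif any(key in anchor_data for key in ["wisdom_thread", "sacred_question"]):
--         return "wisdom_anchor"
--     elif any(key in anchor_data for key in ["fire_circle", "governance"]):
--         return "governance_anchor"
--     elif any(key in anchor_data for key in ["service", "collective"]):
--         return "service_anchor"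
--     else:
--         return "data_anchor"
-- ===== SOURCE B (Python) =====
-- _PRIORITY = {
--     "consciousness_score": 0, "awareness_level": 0,
--     "wisdom_thread": 1, "sacred_question": 1,
--     "fire_circle": 2, "governance": 2,
--     "service": 3, "collective": 3,
-- }
-- _TYPES = ["consciousness_anchor", "wisdom_anchor", "governance_anchor",
--           "service_anchor", "data_anchor"]
--
--
-- def _determine_anchor_type(anchor_data: dict) -> str:
--     """Single pass: take the best (lowest) priority of any key present."""
--     best = 4
--     for key in anchor_data:
--         best = min(best, _PRIORITY.get(key, 4))
--     return _TYPES[best]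
-- ===== Notes on version B (the rewrite author's own statement) =====
-- stated objective: alternative
-- what changed: Replaced the four-branch elif chain of any()-membership tests with a single pass over the dict's keys that takes the minimum priority from a key-to-priority table and indexes a type list with it.
import Mathlib
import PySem

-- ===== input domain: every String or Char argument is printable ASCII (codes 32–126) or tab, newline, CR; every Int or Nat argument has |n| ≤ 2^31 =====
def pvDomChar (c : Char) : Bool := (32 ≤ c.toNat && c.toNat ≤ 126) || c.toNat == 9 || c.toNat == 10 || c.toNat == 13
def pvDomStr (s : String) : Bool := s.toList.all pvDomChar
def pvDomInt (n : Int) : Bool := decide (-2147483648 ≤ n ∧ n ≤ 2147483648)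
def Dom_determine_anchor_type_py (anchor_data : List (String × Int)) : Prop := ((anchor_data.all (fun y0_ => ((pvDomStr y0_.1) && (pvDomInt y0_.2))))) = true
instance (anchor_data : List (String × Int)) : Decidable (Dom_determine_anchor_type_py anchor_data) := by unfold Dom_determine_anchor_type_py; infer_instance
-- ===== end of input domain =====

-- B replaces the elif chain of any()-membership tests by one pass taking the
-- minimum priority of the keys present (alternative decomposition, same cost).

-- ===== PORT A =====
def determine_anchor_type_py (anchor_data : List (String × Int)) : String :=
  if ["consciousness_score", "awareness_level"].any
      (fun key => anchor_data.any (fun p => p.1 == key)) then "consciousness_anchor"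
  else if ["wisdom_thread", "sacred_question"].any
      (fun key => anchor_data.any (fun p => p.1 == key)) then "wisdom_anchor"
  else if ["fire_circle", "governance"].any
      (fun key => anchor_data.any (fun p => p.1 == key)) then "governance_anchor"
  else if ["service", "collective"].any
      (fun key => anchor_data.any (fun p => p.1 == key)) then "service_anchor"
  else "data_anchor"

-- ===== PORT B =====
def pvPriorityTable : PySem.Dict String Int :=
  PySem.Dict.ofList
    [("consciousness_score", 0), ("awareness_level", 0),
     ("wisdom_thread", 1), ("sacred_question", 1),
     ("fire_circle", 2), ("governance", 2),
     ("service", 3), ("collective", 3)]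

def pvTypes : List String :=
  ["consciousness_anchor", "wisdom_anchor", "governance_anchor",
   "service_anchor", "data_anchor"]

def determine_anchor_type_py_alt (anchor_data : List (String × Int)) : String :=
  let best := anchor_data.foldl
    (fun b p => min b (PySem.Dict.getD pvPriorityTable p.1 4)) 4
  PySem.List.pyGetD pvTypes best ""

-- ===== PRECONDITION & SPEC =====
def Spec_determine_anchor_type_py (anchor_data : List (String × Int)) (out : String) : Prop := out = determine_anchor_type_py_alt anchor_data
instance (anchor_data : List (String × Int)) (out : String) : Decidable (Spec_determine_anchor_type_py anchor_data out) := by unfold Spec_determine_anchor_type_py; infer_instance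

-- ===== CLAIM (what is proved, stated in full; the proofs are below) =====
def Claim_equal_determine_anchor_type_py : Prop := ∀ (anchor_data : List (String × Int)), Dom_determine_anchor_type_py anchor_data → Spec_determine_anchor_type_py anchor_data (determine_anchor_type_py anchor_data)

-- ===== LEMMAS AND PROOFS =====

-- the priority of one key
def pvPrio (s : String) : Int := PySem.Dict.getD pvPriorityTable s 4

set_option maxHeartbeats 1000000 in
set_option maxRecDepth 4000 in
lemma pvPrio_eq (s : String) :
    pvPrio s =
      if s == "consciousness_score" then 0 else if s == "awareness_level" then 0
      else if s == "wisdom_thread" then 1 else if s == "sacred_question" then 1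
      else if s == "fire_circle" then 2 else if s == "governance" then 2
      else if s == "service" then 3 else if s == "collective" then 3 else 4 := by
  have h : pvPriorityTable = PySem.Dict.mk
      [("consciousness_score", 0), ("awareness_level", 0),
       ("wisdom_thread", 1), ("sacred_question", 1),
       ("fire_circle", 2), ("governance", 2),
       ("service", 3), ("collective", 3)] := by rfl
  rw [pvPrio, h, PySem.Dict.getD_eq_get?_getD]
  simp only [PySem.Dict.get?_mk_cons, beq_iff_eq]
  split_ifs <;> (try subst s) <;> simp_all [PySem.Dict.get?]

-- if-chain characterisation of the fold minimum
def pvChain (l : List (String × Int)) : Int :=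
  if l.any (fun p => pvPrio p.1 == 0) then 0
  else if l.any (fun p => pvPrio p.1 == 1) then 1
  else if l.any (fun p => pvPrio p.1 == 2) then 2
  else if l.any (fun p => pvPrio p.1 == 3) then 3
  else 4

lemma pvChain_bounds (l : List (String × Int)) : 0 ≤ pvChain l ∧ pvChain l ≤ 4 := by
  unfold pvChain; split_ifs <;> omega

lemma pvPrio_cases (s : String) :
    pvPrio s = 0 ∨ pvPrio s = 1 ∨ pvPrio s = 2 ∨ pvPrio s = 3 ∨ pvPrio s = 4 := by
  rw [pvPrio_eq]; split_ifs <;> omega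

lemma pvFold_eq_chain (l : List (String × Int)) (a : Int) (ha : a ≤ 4) :
    l.foldl (fun b p => min b (pvPrio p.1)) a = min a (pvChain l) := by
  induction l generalizing a with
  | nil => simp [pvChain]; omega
  | cons p t ih =>
    simp only [List.foldl_cons]
    rw [ih (min a (pvPrio p.1)) (by omega)]
    have ht := pvChain_bounds t
    rcases pvPrio_cases p.1 with h | h | h | h | h <;>
      · simp only [pvChain, List.any_cons, h, beq_self_eq_true, Bool.true_or]
        simp only [show ((1:Int) == 0) = false from rfl, show ((2:Int) == 0) = false from rfl,
          show ((2:Int) == 1) = false from rfl, show ((3:Int) == 0) = false from rfl,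
          show ((3:Int) == 1) = false from rfl, show ((3:Int) == 2) = false from rfl,
          show ((4:Int) == 0) = false from rfl, show ((4:Int) == 1) = false from rfl,
          show ((4:Int) == 2) = false from rfl, show ((4:Int) == 3) = false from rfl,
          Bool.false_or, if_true]
        split_ifs <;> omega

lemma pvAnyOr {α : Type} (l : List α) (f g : α → Bool) :
    l.any (fun x => f x || g x) = (l.any f || l.any g) := by
  induction l with
  | nil => simp
  | cons x t ih => cases hf : f x <;> cases hg : g x <;> simp [List.any_cons, hf, hg, ih]

lemma pvPrio0 (s : String) :
    (pvPrio s == 0) = (s == "consciousness_score" || s == "awareness_level") := by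
  rw [pvPrio_eq]; split_ifs <;> simp_all

lemma pvPrio1 (s : String) :
    (pvPrio s == 1) = (s == "wisdom_thread" || s == "sacred_question") := by
  rw [pvPrio_eq]; split_ifs <;> simp_all

lemma pvPrio2 (s : String) :
    (pvPrio s == 2) = (s == "fire_circle" || s == "governance") := by
  rw [pvPrio_eq]; split_ifs <;> simp_all

lemma pvPrio3 (s : String) :
    (pvPrio s == 3) = (s == "service" || s == "collective") := by
  rw [pvPrio_eq]; split_ifs <;> simp_all

lemma pvAny0 (l : List (String × Int)) :
    l.any (fun p => pvPrio p.1 == 0)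
      = (l.any (fun p => p.1 == "consciousness_score") || l.any (fun p => p.1 == "awareness_level")) := by
  rw [← pvAnyOr]; exact PySem.List.any_congr_mem (fun p _ => pvPrio0 p.1)

lemma pvAny1 (l : List (String × Int)) :
    l.any (fun p => pvPrio p.1 == 1)
      = (l.any (fun p => p.1 == "wisdom_thread") || l.any (fun p => p.1 == "sacred_question")) := by
  rw [← pvAnyOr]; exact PySem.List.any_congr_mem (fun p _ => pvPrio1 p.1)

lemma pvAny2 (l : List (String × Int)) :
    l.any (fun p => pvPrio p.1 == 2)
      = (l.any (fun p => p.1 == "fire_circle") || l.any (fun p => p.1 == "governance")) := by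
  rw [← pvAnyOr]; exact PySem.List.any_congr_mem (fun p _ => pvPrio2 p.1)

lemma pvAny3 (l : List (String × Int)) :
    l.any (fun p => pvPrio p.1 == 3)
      = (l.any (fun p => p.1 == "service") || l.any (fun p => p.1 == "collective")) := by
  rw [← pvAnyOr]; exact PySem.List.any_congr_mem (fun p _ => pvPrio3 p.1)

theorem determine_anchor_type_py_spec_aux (l : List (String × Int)) :
    determine_anchor_type_py l = determine_anchor_type_py_alt l := by
  have halt : determine_anchor_type_py_alt l
      = PySem.List.pyGetD pvTypes (l.foldl (fun b p => min b (pvPrio p.1)) 4) "" := rfl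
  rw [halt, pvFold_eq_chain l 4 le_rfl, min_eq_right (pvChain_bounds l).2]
  unfold determine_anchor_type_py pvChain
  simp only [List.any_cons, List.any_nil, Bool.or_false, pvAny0, pvAny1, pvAny2, pvAny3]
  split_ifs <;> rfl

-- ===== VERDICT (by name: the statement is the Claim_ definition above) =====
theorem determine_anchor_type_py_spec : Claim_equal_determine_anchor_type_py := by
  intro l _
  exact determine_anchor_type_py_spec_aux l
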